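-- pv_equiv track=rewrite | github.com/zahidplanet/DocProcessor | src/utils/document_processor.py | extract_document_sections
-- ===== SOURCE A (Python) =====
-- from typing import Dict, Any, List, Tuple
--
-- def extract_document_sections(text: str) -> List[Tuple[str, str]]:
--     """
--     Extract sections from a document text.
--     Returns a list of tuples (section_title, section_content).
--
--     This is a simplified implementation that would need to be adapted
--     based on the actual structure of the documents being processed.
--     """
--     # This is a placeholder implementation
--     sections = []
--     lines = text.split('\n')
--     current_section = None
--     current_content = []
--
--     for line in lines:
--         # Simple heuristic - section titles are uppercase and not too long
--         if line.strip().isupper() and len(line.strip()) > 3 and len(line.strip()) < 50: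
--             if current_section:
--                 sections.append((current_section, '\n'.join(current_content)))
--             current_section = line.strip()
--             current_content = []
--         else:
--             if current_section:
--                 current_content.append(line)
--
--     # Add the last section
--     if current_section:
--         sections.append((current_section, '\n'.join(current_content)))
--
--     return sections
-- ===== SOURCE B (Python) =====
-- from typing import List, Tuple
--
-- def extract_document_sections(text: str) -> List[Tuple[str, str]]:
--     # Back-to-front pass: sections are emitted when their title line is reached
--     # from below, so no Optional "current section" state and no final flush.
--     sections = []
--     buf = []  # pending content lines, collected in reverse order
--     for line in reversed(text.split('\n')):
--         s = line.strip()
--         if s.isupper() and 3 < len(s) < 50: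
--             sections.append((s, '\n'.join(reversed(buf))))
--             buf = []
--         else:
--             buf.append(line)
--     sections.reverse()
--     return sections
-- ===== Notes on version B (the rewrite author's own statement) =====
-- stated objective: alternative
-- what changed: Replaces A's forward scan threading a mutable Optional current-section/current-content state with a trailing flush by a single back-to-front pass that emits each (title, content) pair the moment its title line is reached, then reverses the result; no Optional state and no final flush.
import Mathlib
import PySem

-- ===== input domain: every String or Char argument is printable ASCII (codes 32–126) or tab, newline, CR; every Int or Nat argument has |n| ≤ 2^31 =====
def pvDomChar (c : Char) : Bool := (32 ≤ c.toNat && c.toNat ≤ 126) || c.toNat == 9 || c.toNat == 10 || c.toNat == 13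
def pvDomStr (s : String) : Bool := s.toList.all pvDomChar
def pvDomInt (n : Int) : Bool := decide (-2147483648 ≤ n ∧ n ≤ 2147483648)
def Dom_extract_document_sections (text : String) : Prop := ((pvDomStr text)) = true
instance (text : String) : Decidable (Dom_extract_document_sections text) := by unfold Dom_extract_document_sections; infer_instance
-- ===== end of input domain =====

-- B replaces A's forward scan with Optional current-section state and trailing flush by a
-- back-to-front pass emitting each section at its title line; alternative decomposition, same cost.


-- Python str.isupper(): some cased character and no lowercase one; exact on ASCII,
-- where the cased characters are exactly the letters.
def pvStrIsupper (s : String) : Bool :=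
  s.toList.any PySem.Chars.isupper && s.toList.all (fun c => !PySem.Chars.islower c)

-- the shared title heuristic: line.strip().isupper() and 3 < len(line.strip()) < 50
def pvTitle (line : String) : Bool :=
  pvStrIsupper (PySem.Str.strip line) && PySem.Str.len (PySem.Str.strip line) > 3
    && PySem.Str.len (PySem.Str.strip line) < 50

-- ===== PORT A =====
-- A's loop body: the (sections, current_section, current_content) state
def pvStepA (st : List (String × String) × Option String × List String) (line : String) :
    List (String × String) × Option String × List String :=
  if pvTitle line then
    (match st.2.1 with
     | some cs => (st.1 ++ [(cs, PySem.Str.join "\n" st.2.2)], some (PySem.Str.strip line), ([] : List String))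
     | none => (st.1, some (PySem.Str.strip line), ([] : List String)))
  else
    (match st.2.1 with
     | some _ => (st.1, st.2.1, st.2.2 ++ [line])
     | none => st)

-- A's trailing flush ("add the last section")
def pvFinA (st : List (String × String) × Option String × List String) : List (String × String) :=
  match st.2.1 with
  | some cs => st.1 ++ [(cs, PySem.Str.join "\n" st.2.2)]
  | none => st.1

def extract_document_sections (text : String) : List (String × String) :=
  let lines := (PySem.Str.split? text "\n").getD []
  pvFinA (lines.foldl pvStepA ([], none, []))

-- ===== PORT B =====
-- B's loop body over reversed(lines): state (sections-so-far, pending content lines reversed)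
def pvStepB (st : List (String × String) × List String) (line : String) :
    List (String × String) × List String :=
  let s := PySem.Str.strip line
  if pvStrIsupper s && PySem.Str.len s > 3 && PySem.Str.len s < 50 then
    (st.1 ++ [(s, PySem.Str.join "\n" st.2.reverse)], [])
  else
    (st.1, st.2 ++ [line])

def extract_document_sections_alt (text : String) : List (String × String) :=
  let lines := (PySem.Str.split? text "\n").getD []
  let st := lines.reverse.foldl pvStepB ([], [])
  st.1.reverse

-- ===== PRECONDITION & SPEC =====
def Spec_extract_document_sections (text : String) (out : List (String × String)) : Prop := out = extract_document_sections_alt text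
instance (text : String) (out : List (String × String)) : Decidable (Spec_extract_document_sections text out) := by unfold Spec_extract_document_sections; infer_instance

-- ===== CLAIM (what is proved, stated in full; the proofs are below) =====
def Claim_equal_extract_document_sections : Prop := ∀ (text : String), Dom_extract_document_sections text → Spec_extract_document_sections text (extract_document_sections text)

-- ===== LEMMAS AND PROOFS =====

-- common reference recursion: skip to a title, pair it with the lines up to the next title
def pvGo : List String → List (String × String)
  | [] => []
  | l :: ls =>
    if pvTitle l then
      (PySem.Str.strip l, PySem.Str.join "\n" (ls.takeWhile (fun x => !pvTitle x)))
        :: pvGo (ls.dropWhile (fun x => !pvTitle x))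
    else pvGo ls
termination_by ls => ls.length
decreasing_by
  · exact Nat.lt_succ_of_le (ls.length_dropWhile_le _)
  · simp

theorem pvGo_dropWhile (ls : List String) :
    pvGo (ls.dropWhile (fun x => !pvTitle x)) = pvGo ls := by
  induction ls with
  | nil => rfl
  | cons l ls ih =>
    by_cases h : pvTitle l
    · simp [List.dropWhile_cons, h]
    · simp [List.dropWhile_cons, h, pvGo, ih]

theorem pvA2 (ls : List String) (secs : List (String × String)) (t : String) (cont : List String) :
    pvFinA (ls.foldl pvStepA (secs, some t, cont)) =
      secs ++ (t, PySem.Str.join "\n" (cont ++ ls.takeWhile (fun x => !pvTitle x)))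
        :: pvGo (ls.dropWhile (fun x => !pvTitle x)) := by
  induction ls generalizing secs t cont with
  | nil => simp [pvFinA, pvGo]
  | cons l ls ih =>
    by_cases h : pvTitle l
    · simp only [List.foldl_cons, pvStepA, h, List.takeWhile_cons, List.dropWhile_cons,
        Bool.not_true, if_true, Bool.false_eq_true, if_false]
      rw [ih]
      simp [pvGo, h]
    · simp only [List.foldl_cons, pvStepA, h, List.takeWhile_cons, List.dropWhile_cons,
        Bool.not_true, if_true, Bool.false_eq_true, if_false]
      rw [ih]
      simp [h]

theorem pvA1 (ls : List String) (secs : List (String × String)) :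
    pvFinA (ls.foldl pvStepA (secs, none, [])) = secs ++ pvGo ls := by
  induction ls generalizing secs with
  | nil => simp [pvFinA, pvGo]
  | cons l ls ih =>
    by_cases h : pvTitle l
    · simp only [List.foldl_cons, pvStepA, h, if_true, Bool.false_eq_true, if_false]
      rw [pvA2]
      simp [pvGo, h]
    · simp only [List.foldl_cons, pvStepA, h, if_true, Bool.false_eq_true, if_false]
      rw [ih]
      simp [pvGo, h]

theorem pvStepB_eq (st : List (String × String) × List String) (line : String) :
    pvStepB st line =
      if pvTitle line then
        (st.1 ++ [(PySem.Str.strip line, PySem.Str.join "\n" st.2.reverse)], [])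
      else (st.1, st.2 ++ [line]) := rfl

theorem pvB1 (ls : List String) :
    (ls.foldr (fun x st => pvStepB st x) ([], [])).2
        = (ls.takeWhile (fun x => !pvTitle x)).reverse ∧
    (ls.foldr (fun x st => pvStepB st x) ([], [])).1.reverse
        = pvGo (ls.dropWhile (fun x => !pvTitle x)) := by
  induction ls with
  | nil => simp [pvGo]
  | cons l ls ih =>
    simp only [pvStepB_eq] at ih ⊢
    by_cases h : pvTitle l
    · refine ⟨by simp [h], ?_⟩
      simp only [List.foldr_cons, h, if_true, Bool.false_eq_true, if_false, List.dropWhile_cons, Bool.not_true,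
        List.reverse_append, List.reverse_cons, List.reverse_nil, List.nil_append,
        List.cons_append]
      rw [ih.1, ih.2, pvGo_dropWhile]
      rw [List.reverse_reverse, ← pvGo_dropWhile ls]
      simp [pvGo, h]
    · refine ⟨?_, ?_⟩
      · simp [List.foldr_cons, h, List.takeWhile_cons, ih.1]
      · simp only [List.foldr_cons, h, if_false, Bool.false_eq_true, if_true, List.dropWhile_cons, Bool.not_true]
        simpa [h] using ih.2

theorem pvKey (lines : List String) :
    pvFinA (lines.foldl pvStepA ([], none, [])) = (lines.reverse.foldl pvStepB ([], [])).1.reverse := by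
  rw [List.foldl_reverse]
  have hB := (pvB1 lines).2
  rw [pvGo_dropWhile] at hB
  rw [pvA1, hB]
  simp

-- ===== VERDICT (by name: the statement is the Claim_ definition above) =====
theorem extract_document_sections_spec : Claim_equal_extract_document_sections := by
  intro text _
  exact pvKey ((PySem.Str.split? text "\n").getD [])
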